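-- pv_equiv track=rewrite | github.com/honu-shell-utions/python | sandbox/project_euler/951-1000/955-finding_triangles1.py | find_nth_index_fast
-- ===== SOURCE A (Python) =====
-- def T(n):
--     return n * (n + 1) // 2
--
-- def next_hit_from_triangle_index(t):
--     N = t * (t + 1)
--     best_g = None
--     best_m = None
--
--     a = 1
--     while a * a <= N:
--         if N % a == 0:
--             b = N // a
--
--             # need g to be a positive integer
--             if (b - a - 1) % 2 == 0:
--                 g = (b - a - 1) // 2
--                 m = (a + b - 1) // 2
--
--                 if g > 0 and (best_g is None or g < best_g):
--                     best_g = g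
--                     best_m = m
--         a += 1
--
--     return best_g, best_m
--
-- def find_nth_index_fast(n):
--     # first hit is 3 = T_2 at sequence index 0
--     hit_count = 1
--     seq_index = 0
--     t = 2   # current hit value is T_t
--
--     if n == 1:
--         return seq_index, T(t)
--
--     while hit_count < n:
--         g, next_t = next_hit_from_triangle_index(t)
--         seq_index += g
--         t = next_t
--         hit_count += 1
--
--     return seq_index, T(t)
-- ===== SOURCE B (Python) =====
-- def find_nth_index_fast(n):
--     # Walk the same hit chain, but find each next hit from the factor
--     # structure of t and t+1 instead of trial division over all of t*(t+1).
--     seq_index = 0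
--     t = 2
--     for _ in range(n - 1):
--         g, t = _best_hit(t)
--         seq_index += g
--     return seq_index, t * (t + 1) // 2
--
--
-- def _divisors(x):
--     """All divisors of x, by trial division up to sqrt(x)."""
--     ds = []
--     d = 1
--     while d * d <= x:
--         if x % d == 0:
--             ds.append(d)
--             if d != x // d:
--                 ds.append(x // d)
--         d += 1
--     return ds
--
--
-- def _best_hit(t):
--     # Every divisor a of N = t*(t+1) splits uniquely as a1*a2 with a1 | t and
--     # a2 | t+1 (t and t+1 are coprime).  The admissible divisor with the
--     # largest a gives the smallest gap g; return (g, next t).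
--     N = t * (t + 1)
--     best_a = 0
--     for a1 in _divisors(t):
--         for a2 in _divisors(t + 1):
--             a = a1 * a2
--             b = N // a
--             if best_a < a and a * a <= N and (b - a - 1) % 2 == 0 and b - a - 1 > 0:
--                 best_a = a
--     b = N // best_a
--     return (b - best_a - 1) // 2, (b + best_a - 1) // 2
-- ===== Notes on version B (the rewrite author's own statement) =====
-- stated objective: faster
-- what changed: Each step's best divisor pair of N=t*(t+1) is found by enumerating divisors of the coprime factors t and t+1 separately (trial division to sqrt(t)) and maximizing over their products, instead of A's trial-division scan of every a up to sqrt(N)=t with a running minimum of g.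
import Mathlib
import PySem

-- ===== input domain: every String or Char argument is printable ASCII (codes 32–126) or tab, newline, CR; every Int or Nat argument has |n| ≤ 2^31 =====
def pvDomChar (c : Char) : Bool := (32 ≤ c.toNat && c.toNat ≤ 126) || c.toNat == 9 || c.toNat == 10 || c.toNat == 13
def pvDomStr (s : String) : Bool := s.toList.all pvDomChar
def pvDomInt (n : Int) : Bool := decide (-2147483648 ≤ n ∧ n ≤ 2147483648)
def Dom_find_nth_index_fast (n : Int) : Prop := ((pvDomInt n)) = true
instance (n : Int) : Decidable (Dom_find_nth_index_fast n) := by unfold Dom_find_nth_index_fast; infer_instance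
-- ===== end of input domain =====

-- B replaces A's per-step trial-division scan over all of t*(t+1) by divisor
-- enumeration built from the two coprime factors t and t+1; same return value.

-- ===== PORT A =====

def pvT (x : Int) : Int := PySem.Int.floordiv (x * (x + 1)) 2

-- g = (b - a - 1) // 2  and  m = (a + b - 1) // 2  with  b = N // a
def gOf (N x : Int) : Int :=
  PySem.Int.floordiv (PySem.Int.floordiv N x - x - 1) 2
def mOf (N x : Int) : Int :=
  PySem.Int.floordiv (x + PySem.Int.floordiv N x - 1) 2

-- while a * a <= N: … a += 1   (best = (best_g, best_m) as an Option pair;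
-- the Nat fuel only makes the loop total: it starts at the measure N + 1 - a
-- and never runs out while the guard a * a <= N holds)
def nextHitLoopA (N : Int) : Int → Option (Int × Int) → Nat → Option (Int × Int)
  | _, best, 0 => best
  | a, best, fuel + 1 =>
    if a * a ≤ N then
      nextHitLoopA N (a + 1)
        (if PySem.Int.mod N a = 0 then
          (if PySem.Int.mod (PySem.Int.floordiv N a - a - 1) 2 = 0 then
            (if 0 < gOf N a then
              (match best with
               | none => some (gOf N a, mOf N a)
               | some p => if gOf N a < p.1 then some (gOf N a, mOf N a) else best)
             else best)
           else best)
         else best) fuel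
    else best

def next_hit_from_triangle_index (t : Int) : Option (Int × Int) :=
  nextHitLoopA (t * (t + 1)) 1 none (t * (t + 1)).toNat

-- while hit_count < n: …  (fuel = n - hit_count)
def loopA : Nat → Int → Int → List Int
  | 0, seq_index, t => [seq_index, pvT t]
  | fuel + 1, seq_index, t =>
      let r := (next_hit_from_triangle_index t).getD (0, 0)
      loopA fuel (seq_index + r.1) r.2

def find_nth_index_fast (n : Int) : List Int :=
  if n = 1 then [0, pvT 2]
  else loopA (n - 1).toNat 0 2

-- ===== PORT B =====

-- ds = []; d = 1; while d*d <= x: append d (and x//d if distinct); d += 1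
-- (same Nat-fuel totality guard: fuel starts at the measure and never runs out)
def divLoopB (x : Int) : Int → List Int → Nat → List Int
  | _, acc, 0 => acc
  | d, acc, fuel + 1 =>
    if d * d ≤ x then
      divLoopB x (d + 1)
        (if PySem.Int.mod x d = 0 then
          (if d ≠ PySem.Int.floordiv x d then acc ++ [d, PySem.Int.floordiv x d]
           else acc ++ [d])
         else acc) fuel
    else acc

def divisorsB (x : Int) : List Int := divLoopB x 1 [] x.toNat

def bestHitB (t : Int) : Int × Int :=
  let N := t * (t + 1)
  let best :=
    (divisorsB t).foldl (fun best a1 =>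
      (divisorsB (t + 1)).foldl (fun best a2 =>
        if best < a1 * a2 ∧ (a1 * a2) * (a1 * a2) ≤ N ∧
            PySem.Int.mod (PySem.Int.floordiv N (a1 * a2) - a1 * a2 - 1) 2 = 0 ∧
            0 < PySem.Int.floordiv N (a1 * a2) - a1 * a2 - 1
        then a1 * a2 else best) best) 0
  (PySem.Int.floordiv (PySem.Int.floordiv N best - best - 1) 2,
   PySem.Int.floordiv (PySem.Int.floordiv N best + best - 1) 2)

def find_nth_index_fast_alt (n : Int) : List Int :=
  let p := (PySem.List.pyRange 0 (n - 1) 1).foldl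
      (fun (st : Int × Int) _ => let r := bestHitB st.2; (st.1 + r.1, r.2)) (0, 2)
  [p.1, PySem.Int.floordiv (p.2 * (p.2 + 1)) 2]

-- ===== PRECONDITION & SPEC =====
def Spec_find_nth_index_fast (n : Int) (out : List Int) : Prop := out = find_nth_index_fast_alt n
instance (n : Int) (out : List Int) : Decidable (Spec_find_nth_index_fast n out) := by unfold Spec_find_nth_index_fast; infer_instance

-- ===== CLAIM (what is proved, stated in full; the proofs are below) =====
def Claim_equal_find_nth_index_fast : Prop := ∀ (n : Int), Dom_find_nth_index_fast n → Spec_find_nth_index_fast n (find_nth_index_fast n)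

-- ===== LEMMAS AND PROOFS =====

-- the size/parity/positivity part of the acceptance test (shared by both ports)
def Qv (N a : Int) : Prop :=
  a * a ≤ N ∧ PySem.Int.mod (PySem.Int.floordiv N a - a - 1) 2 = 0 ∧
  0 < PySem.Int.floordiv N a - a - 1

-- the divisors A's scan accepts
def ValidDiv (N a : Int) : Prop := 1 ≤ a ∧ PySem.Int.mod N a = 0 ∧ Qv N a

lemma fd_two_pos {k : Int} (hpar : PySem.Int.mod k 2 = 0) :
    0 < PySem.Int.floordiv k 2 ↔ 0 < k := by
  rw [PySem.Int.mod_eq_emod_of_pos (by norm_num)] at hpar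
  rw [PySem.Int.floordiv_eq_ediv_of_pos (by norm_num)]
  omega

lemma valid_dvd {N a : Int} (h : ValidDiv N a) : a ∣ N := by
  obtain ⟨h1, h3, -⟩ := h
  rw [PySem.Int.mod_eq_emod_of_pos (by omega)] at h3
  exact Int.dvd_of_emod_eq_zero h3

lemma valid_one {t : Int} (ht : 2 ≤ t) : ValidDiv (t * (t + 1)) 1 := by
  have hev : (t * (t + 1)) % 2 = 0 := Int.even_iff.mp (Int.even_mul_succ_self t)
  refine ⟨le_refl 1, ?_, ?_, ?_, ?_⟩
  · rw [PySem.Int.mod_eq_emod_of_pos one_pos, Int.emod_one]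
  · nlinarith
  · rw [PySem.Int.floordiv_eq_ediv_of_pos one_pos,
      PySem.Int.mod_eq_emod_of_pos (by norm_num), Int.ediv_one]
    omega
  · rw [PySem.Int.floordiv_eq_ediv_of_pos one_pos, Int.ediv_one]; nlinarith

-- g is strictly antitone on valid divisors
lemma gOf_lt {N x y : Int} (hx : ValidDiv N x) (hy : ValidDiv N y)
    (hxy : x < y) : gOf N y < gOf N x := by
  have hdx : x ∣ N := valid_dvd hx
  have hdy : y ∣ N := valid_dvd hy
  obtain ⟨hx1, -, -, hxp, hxpos⟩ := hx
  obtain ⟨hy1, -, -, hyp, hypos⟩ := hy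
  have hux : PySem.Int.floordiv N x = N / x := PySem.Int.floordiv_eq_ediv_of_pos (by omega)
  have huy : PySem.Int.floordiv N y = N / y := PySem.Int.floordiv_eq_ediv_of_pos (by omega)
  have hmx : N / x * x = N := Int.ediv_mul_cancel hdx
  have hmy : N / y * y = N := Int.ediv_mul_cancel hdy
  have hu0 : 0 < N / x := by nlinarith [Int.le_total (N / x) 0]
  have hvu : N / y < N / x := by nlinarith [Int.le_total (N / x) (N / y)]
  rw [hux] at hxp
  rw [huy] at hyp
  rw [PySem.Int.mod_eq_emod_of_pos (by norm_num)] at hxp hyp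
  unfold gOf
  rw [hux, huy, PySem.Int.floordiv_eq_ediv_of_pos (by norm_num),
    PySem.Int.floordiv_eq_ediv_of_pos (by norm_num)]
  omega

-- invariant for A's upward scan
def InvA (N a : Int) (best : Option (Int × Int)) : Prop :=
  (best = none ∧ ∀ y, ValidDiv N y → a ≤ y) ∨
  (∃ x, ValidDiv N x ∧ x < a ∧ best = some (gOf N x, mOf N x) ∧
    ∀ y, ValidDiv N y → y < a → y ≤ x)

lemma loopA_run (N M : Int) (hM : ValidDiv N M)
    (hmax : ∀ y, ValidDiv N y → y ≤ M) :
    ∀ (k : Nat) (a : Int) (best : Option (Int × Int)), (N + 1 - a).toNat = k →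
      1 ≤ a → InvA N a best → nextHitLoopA N a best k = some (gOf N M, mOf N M) := by
  have hM1 : 1 ≤ M := hM.1
  have hMM : M * M ≤ N := hM.2.2.1
  have hNM : M ≤ N := le_trans (by nlinarith) hMM
  have hterm : ∀ (a : Int) (best : Option (Int × Int)), M < a → InvA N a best →
      best = some (gOf N M, mOf N M) := by
    intro a best hMa hinv
    rcases hinv with ⟨hbn, hlow⟩ | ⟨x, hvx, hxa, hbs, hub⟩
    · exact absurd (hlow M hM) (by omega)
    · have hxM : x = M := le_antisymm (hmax x hvx) (hub M hM hMa)
      rw [hbs, hxM]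
  intro k
  induction k with
  | zero =>
    intro a best hk ha hinv
    have hMa : M < a := by omega
    exact hterm a best hMa hinv
  | succ k ih =>
    intro a best hk ha hinv
    simp only [nextHitLoopA]
    by_cases hle : a * a ≤ N
    · rw [if_pos hle]
      have haa : a ≤ a * a := by nlinarith
      have haN : a ≤ N := le_trans haa hle
      apply ih (a + 1) _ (by omega) (by omega)
      by_cases hva : ValidDiv N a
      · have hmod : PySem.Int.mod N a = 0 := hva.2.1
        have hpar : PySem.Int.mod (PySem.Int.floordiv N a - a - 1) 2 = 0 := hva.2.2.2.1
        have hgpos : 0 < gOf N a := (fd_two_pos hpar).mpr hva.2.2.2.2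
        rw [if_pos hmod, if_pos hpar, if_pos hgpos]
        rcases hinv with ⟨hbn, hlow⟩ | ⟨x, hvx, hxa, hbs, hub⟩
        · subst hbn
          right
          exact ⟨a, hva, by omega, rfl, fun y hy hya => by omega⟩
        · subst hbs
          show InvA N (a + 1) (if gOf N a < gOf N x then some (gOf N a, mOf N a)
            else some (gOf N x, mOf N x))
          rw [if_pos (gOf_lt hvx hva hxa)]
          right
          exact ⟨a, hva, by omega, rfl, fun y hy hya => by omega⟩
      · have hkeep : InvA N (a + 1) best := by
          rcases hinv with ⟨hbn, hlow⟩ | ⟨x, hvx, hxa, hbs, hub⟩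
          · left
            refine ⟨hbn, fun y hy => ?_⟩
            have := hlow y hy
            rcases eq_or_lt_of_le this with heq | hlt
            · exact absurd (heq ▸ hy) hva
            · omega
          · right
            refine ⟨x, hvx, by omega, hbs, fun y hy hya => ?_⟩
            by_cases hyeq : y = a
            · exact absurd (hyeq ▸ hy) hva
            · exact hub y hy (by omega)
        by_cases h1 : PySem.Int.mod N a = 0
        · rw [if_pos h1]
          by_cases h2 : PySem.Int.mod (PySem.Int.floordiv N a - a - 1) 2 = 0
          · by_cases h3 : 0 < gOf N a
            · exact absurd ⟨ha, h1, hle, h2, (fd_two_pos h2).mp h3⟩ hva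
            · rw [if_pos h2, if_neg h3]
              exact hkeep
          · rw [if_neg h2]
            exact hkeep
        · rw [if_neg h1]
          exact hkeep
    · rw [if_neg hle]
      have hMa : M < a := by
        by_contra hcon
        rw [not_lt] at hcon
        have : a * a ≤ M * M := mul_le_mul hcon hcon (by omega) (by omega)
        omega
      exact hterm a best hMa hinv

-- divisor-list loop characterisation
lemma divLoopB_mem (x : Int) :
    ∀ (k : Nat) (d : Int) (acc : List Int) (c : Int), (x + 1 - d).toNat = k → 1 ≤ d →
      (c ∈ divLoopB x d acc k ↔
        c ∈ acc ∨ ∃ e, d ≤ e ∧ e * e ≤ x ∧ PySem.Int.mod x e = 0 ∧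
          (c = e ∨ c = PySem.Int.floordiv x e)) := by
  have hnone : ∀ (d : Int), 1 ≤ d → x < d * d → ∀ (c : Int) (acc : List Int),
      (c ∈ acc ↔ c ∈ acc ∨ ∃ e, d ≤ e ∧ e * e ≤ x ∧ PySem.Int.mod x e = 0 ∧
        (c = e ∨ c = PySem.Int.floordiv x e)) := by
    intro d hd1 hxd c acc
    constructor
    · exact Or.inl
    · rintro (hin | ⟨e, he1, he2, he3, he4⟩)
      · exact hin
      · exfalso
        have hde : d * d ≤ e * e := by nlinarith
        nlinarith
  intro k
  induction k with
  | zero =>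
    intro d acc c hk hd1
    have hdx : x < d := by omega
    have hxd : x < d * d := by nlinarith
    exact hnone d hd1 hxd c acc
  | succ k ih =>
    intro d acc c hk hd1
    simp only [divLoopB]
    by_cases hdd : d * d ≤ x
    · have hddd : d ≤ d * d := by nlinarith
      have hdx : d ≤ x := le_trans hddd hdd
      rw [if_pos hdd]
      rw [ih (d + 1) (if PySem.Int.mod x d = 0 then
          (if d ≠ PySem.Int.floordiv x d then acc ++ [d, PySem.Int.floordiv x d]
           else acc ++ [d])
         else acc) c (by omega) (by omega)]
      constructor
      · rintro (hin | ⟨e, he1, he2, he3, he4⟩)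
        · by_cases h1 : PySem.Int.mod x d = 0
          · rw [if_pos h1] at hin
            by_cases h2 : d ≠ PySem.Int.floordiv x d
            · rw [if_pos h2] at hin
              simp only [List.mem_append, List.mem_cons] at hin
              rcases hin with hin | hin | hin | hfalse
              · exact Or.inl hin
              · exact Or.inr ⟨d, le_refl d, hdd, h1, Or.inl hin⟩
              · exact Or.inr ⟨d, le_refl d, hdd, h1, Or.inr hin⟩
              · exact absurd hfalse (by simp)
            · rw [if_neg h2] at hin
              simp only [List.mem_append, List.mem_cons] at hin
              rcases hin with hin | hin
              · exact Or.inl hin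
              · rcases hin with hin | hfalse
                · exact Or.inr ⟨d, le_refl d, hdd, h1, Or.inl hin⟩
                · exact absurd hfalse (by simp)
          · rw [if_neg h1] at hin
            exact Or.inl hin
        · exact Or.inr ⟨e, by omega, he2, he3, he4⟩
      · rintro (hin | ⟨e, he1, he2, he3, he4⟩)
        · left
          split_ifs with hA hB
          · exact List.mem_append_left _ hin
          · exact List.mem_append_left _ hin
          · exact hin
        · by_cases hed : e = d
          · subst hed
            left
            by_cases h2 : e ≠ PySem.Int.floordiv x e
            · rw [if_pos he3, if_pos h2]
              simp only [List.mem_append, List.mem_cons]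
              rcases he4 with h | h
              · exact Or.inr (Or.inl h)
              · exact Or.inr (Or.inr (Or.inl h))
            · rw [not_ne_iff] at h2
              rw [if_pos he3, if_neg (not_ne_iff.mpr h2)]
              simp only [List.mem_append, List.mem_cons]
              rcases he4 with h | h
              · exact Or.inr (Or.inl h)
              · exact Or.inr (Or.inl (by rw [h, ← h2]))
          · exact Or.inr ⟨e, by omega, he2, he3, he4⟩
    · rw [if_neg hdd]
      exact hnone d hd1 (by omega) c acc

lemma mem_divisorsB_of_dvd {x c : Int} (hx : 1 ≤ x) (hc : 1 ≤ c) (h : c ∣ x) :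
    c ∈ divisorsB x := by
  rw [divisorsB, divLoopB_mem x x.toNat 1 [] c (by omega) le_rfl]
  right
  have hmod : PySem.Int.mod x c = 0 := by
    rw [PySem.Int.mod_eq_emod_of_pos (by omega)]
    exact Int.emod_eq_zero_of_dvd h
  by_cases hcc : c * c ≤ x
  · exact ⟨c, by omega, hcc, hmod, Or.inl rfl⟩
  · rw [not_le] at hcc
    set e := x / c with hedef
    have hme : e * c = x := Int.ediv_mul_cancel h
    have he1 : 1 ≤ e := by nlinarith [Int.le_total e 0]
    have hec : e < c := by nlinarith
    refine ⟨e, he1, by nlinarith, ?_, Or.inr ?_⟩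
    · rw [PySem.Int.mod_eq_emod_of_pos (by omega)]
      exact Int.emod_eq_zero_of_dvd ⟨c, by linarith⟩
    · rw [PySem.Int.floordiv_eq_ediv_of_pos (by omega)]
      rw [show x = c * e by linarith [hme]]
      rw [Int.mul_ediv_cancel c (by omega)]

lemma divisorsB_sound {x c : Int} (hx : 1 ≤ x) (h : c ∈ divisorsB x) :
    1 ≤ c ∧ c ∣ x := by
  rw [divisorsB, divLoopB_mem x x.toNat 1 [] c (by omega) le_rfl] at h
  rcases h with h | ⟨e, he1, he2, he3, he4⟩
  · simp at h
  · have hde : e ∣ x := by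
      rw [PySem.Int.mod_eq_emod_of_pos (by omega)] at he3
      exact Int.dvd_of_emod_eq_zero he3
    have hme : x / e * e = x := Int.ediv_mul_cancel hde
    have hq1 : 1 ≤ x / e := by nlinarith [Int.le_total (x / e) 0]
    rcases he4 with h | h
    · exact ⟨h ▸ he1, h ▸ hde⟩
    · rw [h, PySem.Int.floordiv_eq_ediv_of_pos (by omega)]
      exact ⟨hq1, ⟨e, by linarith⟩⟩

-- coprime split of a divisor of t*(t+1)
lemma divisor_split {t a : Int} (ht : 1 ≤ t) (ha : 1 ≤ a) (h : a ∣ t * (t + 1)) :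
    ∃ a1 a2, 1 ≤ a1 ∧ 1 ≤ a2 ∧ a1 ∣ t ∧ a2 ∣ (t + 1) ∧ a = a1 * a2 := by
  obtain ⟨T, rfl⟩ : ∃ T : Nat, t = (T : Int) := ⟨t.toNat, (Int.toNat_of_nonneg (by omega)).symm⟩
  obtain ⟨A, rfl⟩ : ∃ A : Nat, a = (A : Int) := ⟨a.toNat, (Int.toNat_of_nonneg (by omega)).symm⟩
  have hdvd : A ∣ T * (T + 1) := by exact_mod_cast h
  have hco : Nat.Coprime T (T + 1) := by simp
  have hsplit : Nat.gcd A T * Nat.gcd A (T + 1) = A :=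
    (Nat.gcd_mul_gcd_eq_iff_dvd_mul_of_coprime hco).mpr hdvd
  have hA1 : 0 < A := by exact_mod_cast ha
  refine ⟨Nat.gcd A T, Nat.gcd A (T + 1), ?_, ?_, ?_, ?_, ?_⟩
  · exact_mod_cast Nat.gcd_pos_of_pos_left T hA1
  · exact_mod_cast Nat.gcd_pos_of_pos_left (T + 1) hA1
  · exact_mod_cast Int.natCast_dvd_natCast.mpr (Nat.gcd_dvd_right A T)
  · exact_mod_cast Int.natCast_dvd_natCast.mpr (Nat.gcd_dvd_right A (T + 1))
  · exact_mod_cast hsplit.symm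

-- the inner fold keeps the largest admissible product seen
lemma inner_fold (N a1 : Int) (l2 : List Int) :
    ∀ b0 : Int,
      b0 ≤ l2.foldl (fun best a2 =>
          if best < a1 * a2 ∧ (a1 * a2) * (a1 * a2) ≤ N ∧
              PySem.Int.mod (PySem.Int.floordiv N (a1 * a2) - a1 * a2 - 1) 2 = 0 ∧
              0 < PySem.Int.floordiv N (a1 * a2) - a1 * a2 - 1
          then a1 * a2 else best) b0 ∧
      (l2.foldl (fun best a2 =>
          if best < a1 * a2 ∧ (a1 * a2) * (a1 * a2) ≤ N ∧
              PySem.Int.mod (PySem.Int.floordiv N (a1 * a2) - a1 * a2 - 1) 2 = 0 ∧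
              0 < PySem.Int.floordiv N (a1 * a2) - a1 * a2 - 1
          then a1 * a2 else best) b0 = b0 ∨
        (∃ a2 ∈ l2, Qv N (a1 * a2) ∧ l2.foldl (fun best a2 =>
          if best < a1 * a2 ∧ (a1 * a2) * (a1 * a2) ≤ N ∧
              PySem.Int.mod (PySem.Int.floordiv N (a1 * a2) - a1 * a2 - 1) 2 = 0 ∧
              0 < PySem.Int.floordiv N (a1 * a2) - a1 * a2 - 1
          then a1 * a2 else best) b0 = a1 * a2)) ∧
      ∀ a2 ∈ l2, Qv N (a1 * a2) → a1 * a2 ≤ l2.foldl (fun best a2 =>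
          if best < a1 * a2 ∧ (a1 * a2) * (a1 * a2) ≤ N ∧
              PySem.Int.mod (PySem.Int.floordiv N (a1 * a2) - a1 * a2 - 1) 2 = 0 ∧
              0 < PySem.Int.floordiv N (a1 * a2) - a1 * a2 - 1
          then a1 * a2 else best) b0 := by
  induction l2 with
  | nil => intro b0; exact ⟨le_rfl, Or.inl rfl, by simp⟩
  | cons x l ih =>
    intro b0
    simp only [List.foldl_cons]
    obtain ⟨ih1, ih2, ih3⟩ := ih (if b0 < a1 * x ∧ (a1 * x) * (a1 * x) ≤ N ∧
        PySem.Int.mod (PySem.Int.floordiv N (a1 * x) - a1 * x - 1) 2 = 0 ∧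
        0 < PySem.Int.floordiv N (a1 * x) - a1 * x - 1 then a1 * x else b0)
    have hstep : b0 ≤ (if b0 < a1 * x ∧ (a1 * x) * (a1 * x) ≤ N ∧
        PySem.Int.mod (PySem.Int.floordiv N (a1 * x) - a1 * x - 1) 2 = 0 ∧
        0 < PySem.Int.floordiv N (a1 * x) - a1 * x - 1 then a1 * x else b0) := by
      split_ifs with hc
      · exact le_of_lt hc.1
      · exact le_rfl
    refine ⟨le_trans hstep ih1, ?_, ?_⟩
    · rcases ih2 with heq | ⟨a2, ha2, hq, heq⟩
      · rw [heq]
        split_ifs at heq ⊢ with hc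
        · exact Or.inr ⟨x, List.mem_cons_self, ⟨hc.2.1, hc.2.2.1, hc.2.2.2⟩, rfl⟩
        · exact Or.inl rfl
      · exact Or.inr ⟨a2, List.mem_cons_of_mem x ha2, hq, heq⟩
    · intro a2 ha2 hq
      rcases List.mem_cons.mp ha2 with rfl | hmem
      · by_cases hc : b0 < a1 * a2 ∧ (a1 * a2) * (a1 * a2) ≤ N ∧
            PySem.Int.mod (PySem.Int.floordiv N (a1 * a2) - a1 * a2 - 1) 2 = 0 ∧
            0 < PySem.Int.floordiv N (a1 * a2) - a1 * a2 - 1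
        · rw [if_pos hc] at ih1 ih3 ⊢
          exact ih1
        · have hle : a1 * a2 ≤ b0 := by
            by_contra hcon
            exact hc ⟨by omega, hq.1, hq.2.1, hq.2.2⟩
          rw [if_neg hc] at ih1 ih3 ⊢
          exact le_trans hle ih1
      · exact ih3 a2 hmem hq

-- the outer fold does the same over all pairs
lemma outer_fold (N : Int) (l2 : List Int) :
    ∀ (l1 : List Int) (b0 : Int),
      b0 ≤ l1.foldl (fun best a1 => l2.foldl (fun best a2 =>
          if best < a1 * a2 ∧ (a1 * a2) * (a1 * a2) ≤ N ∧
              PySem.Int.mod (PySem.Int.floordiv N (a1 * a2) - a1 * a2 - 1) 2 = 0 ∧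
              0 < PySem.Int.floordiv N (a1 * a2) - a1 * a2 - 1
          then a1 * a2 else best) best) b0 ∧
      (l1.foldl (fun best a1 => l2.foldl (fun best a2 =>
          if best < a1 * a2 ∧ (a1 * a2) * (a1 * a2) ≤ N ∧
              PySem.Int.mod (PySem.Int.floordiv N (a1 * a2) - a1 * a2 - 1) 2 = 0 ∧
              0 < PySem.Int.floordiv N (a1 * a2) - a1 * a2 - 1
          then a1 * a2 else best) best) b0 = b0 ∨
        ∃ a1 ∈ l1, ∃ a2 ∈ l2, Qv N (a1 * a2) ∧ l1.foldl (fun best a1 => l2.foldl (fun best a2 =>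
          if best < a1 * a2 ∧ (a1 * a2) * (a1 * a2) ≤ N ∧
              PySem.Int.mod (PySem.Int.floordiv N (a1 * a2) - a1 * a2 - 1) 2 = 0 ∧
              0 < PySem.Int.floordiv N (a1 * a2) - a1 * a2 - 1
          then a1 * a2 else best) best) b0 = a1 * a2) ∧
      ∀ a1 ∈ l1, ∀ a2 ∈ l2, Qv N (a1 * a2) → a1 * a2 ≤ l1.foldl (fun best a1 => l2.foldl (fun best a2 =>
          if best < a1 * a2 ∧ (a1 * a2) * (a1 * a2) ≤ N ∧
              PySem.Int.mod (PySem.Int.floordiv N (a1 * a2) - a1 * a2 - 1) 2 = 0 ∧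
              0 < PySem.Int.floordiv N (a1 * a2) - a1 * a2 - 1
          then a1 * a2 else best) best) b0 := by
  intro l1
  induction l1 with
  | nil => intro b0; exact ⟨le_rfl, Or.inl rfl, by simp⟩
  | cons x l ih =>
    intro b0
    simp only [List.foldl_cons]
    obtain ⟨in1, in2, in3⟩ := inner_fold N x l2 b0
    obtain ⟨ih1, ih2, ih3⟩ := ih (l2.foldl (fun best a2 =>
        if best < x * a2 ∧ (x * a2) * (x * a2) ≤ N ∧
            PySem.Int.mod (PySem.Int.floordiv N (x * a2) - x * a2 - 1) 2 = 0 ∧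
            0 < PySem.Int.floordiv N (x * a2) - x * a2 - 1
        then x * a2 else best) b0)
    refine ⟨le_trans in1 ih1, ?_, ?_⟩
    · rcases ih2 with heq | ⟨a1, ha1, a2, ha2, hq, heq⟩
      · rw [heq]
        rcases in2 with heq2 | ⟨a2, ha2, hq, heq2⟩
        · exact Or.inl heq2
        · exact Or.inr ⟨x, List.mem_cons_self, a2, ha2, hq, heq2⟩
      · exact Or.inr ⟨a1, List.mem_cons_of_mem x ha1, a2, ha2, hq, heq⟩
    · intro a1 ha1 a2 ha2 hq
      rcases List.mem_cons.mp ha1 with rfl | hmem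
      · exact le_trans (in3 a2 ha2 hq) ih1
      · exact ih3 a1 hmem a2 ha2 hq

-- B's double fold finds the maximal valid divisor, and bestHitB reports its (g, m)
lemma bestHitB_max {t : Int} (ht : 2 ≤ t) :
    ∃ M, ValidDiv (t * (t + 1)) M ∧ (∀ y, ValidDiv (t * (t + 1)) y → y ≤ M) ∧
      bestHitB t = (gOf (t * (t + 1)) M, mOf (t * (t + 1)) M) := by
  have hN : 0 < t * (t + 1) := by nlinarith
  obtain ⟨of1, of2, of3⟩ := outer_fold (t * (t + 1)) (divisorsB (t + 1)) (divisorsB t) 0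
  set R := (divisorsB t).foldl (fun best a1 => (divisorsB (t + 1)).foldl (fun best a2 =>
      if best < a1 * a2 ∧ (a1 * a2) * (a1 * a2) ≤ t * (t + 1) ∧
          PySem.Int.mod (PySem.Int.floordiv (t * (t + 1)) (a1 * a2) - a1 * a2 - 1) 2 = 0 ∧
          0 < PySem.Int.floordiv (t * (t + 1)) (a1 * a2) - a1 * a2 - 1
      then a1 * a2 else best) best) 0 with hRdef
  have h1t : (1 : Int) ∈ divisorsB t := mem_divisorsB_of_dvd (by omega) le_rfl (one_dvd t)
  have h1t1 : (1 : Int) ∈ divisorsB (t + 1) := mem_divisorsB_of_dvd (by omega) le_rfl (one_dvd (t + 1))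
  have hq1 : Qv (t * (t + 1)) (1 * 1) := by
    have := (valid_one ht).2.2
    rwa [show (1 : Int) * 1 = 1 by ring]
  have hR1 : 1 ≤ R := by
    have := of3 1 h1t 1 h1t1 hq1
    omega
  have hvR : ValidDiv (t * (t + 1)) R := by
    rcases of2 with heq | ⟨a1, ha1, a2, ha2, hq, heq⟩
    · omega
    · obtain ⟨ha1p, ha1d⟩ := divisorsB_sound (by omega) ha1
      obtain ⟨ha2p, ha2d⟩ := divisorsB_sound (by omega) ha2
      have hdvd : R ∣ t * (t + 1) := heq ▸ mul_dvd_mul ha1d ha2d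
      refine ⟨hR1, ?_, heq ▸ hq⟩
      rw [PySem.Int.mod_eq_emod_of_pos (by omega)]
      exact Int.emod_eq_zero_of_dvd hdvd
  have hmaxR : ∀ y, ValidDiv (t * (t + 1)) y → y ≤ R := by
    intro y hy
    obtain ⟨a1, a2, ha1p, ha2p, ha1d, ha2d, hyeq⟩ :=
      divisor_split (by omega) hy.1 (valid_dvd hy)
    have hm1 : a1 ∈ divisorsB t := mem_divisorsB_of_dvd (by omega) ha1p ha1d
    have hm2 : a2 ∈ divisorsB (t + 1) := mem_divisorsB_of_dvd (by omega) ha2p ha2d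
    have hqy : Qv (t * (t + 1)) (a1 * a2) := hyeq ▸ hy.2.2
    have := of3 a1 hm1 a2 hm2 hqy
    omega
  refine ⟨R, hvR, hmaxR, ?_⟩
  simp only [bestHitB, ← hRdef]
  refine Prod.ext rfl ?_
  show PySem.Int.floordiv (PySem.Int.floordiv (t * (t + 1)) R + R - 1) 2 = mOf (t * (t + 1)) R
  unfold mOf
  rw [show PySem.Int.floordiv (t * (t + 1)) R + R - 1 = R + PySem.Int.floordiv (t * (t + 1)) R - 1 from by ring]

lemma nextHit_eq {t : Int} (ht : 2 ≤ t) :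
    next_hit_from_triangle_index t = some (bestHitB t) := by
  obtain ⟨M, hM, hmax, heq⟩ := bestHitB_max ht
  rw [next_hit_from_triangle_index,
    loopA_run (t * (t + 1)) M hM hmax (t * (t + 1)).toNat 1 none (by omega) le_rfl
      (Or.inl ⟨rfl, fun y hy => hy.1⟩), heq]

lemma bestHitB_snd_ge {t : Int} (ht : 2 ≤ t) : 2 ≤ (bestHitB t).2 := by
  obtain ⟨M, hM, -, heq⟩ := bestHitB_max ht
  rw [heq]
  obtain ⟨hM1, -, -, hpar, hpos⟩ := hM
  show 2 ≤ mOf (t * (t + 1)) M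
  unfold mOf
  rw [PySem.Int.mod_eq_emod_of_pos (by norm_num)] at hpar
  rw [PySem.Int.floordiv_eq_ediv_of_pos (by norm_num)]
  omega

lemma loopA_eq_fold (fuel : Nat) :
    ∀ (l : List Int), l.length = fuel → ∀ (s t : Int), 2 ≤ t →
      loopA fuel s t =
        [(l.foldl (fun (st : Int × Int) _ => let r := bestHitB st.2; (st.1 + r.1, r.2)) (s, t)).1,
         PySem.Int.floordiv ((l.foldl (fun (st : Int × Int) _ => let r := bestHitB st.2; (st.1 + r.1, r.2)) (s, t)).2 *
           ((l.foldl (fun (st : Int × Int) _ => let r := bestHitB st.2; (st.1 + r.1, r.2)) (s, t)).2 + 1)) 2] := by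
  induction fuel with
  | zero =>
    intro l hl s t ht
    rw [List.length_eq_zero_iff] at hl
    subst hl
    simp [loopA, pvT]
  | succ fuel ihf =>
    intro l hl s t ht
    rcases l with _ | ⟨x, l'⟩
    · simp at hl
    · simp only [List.length_cons, Nat.succ.injEq] at hl
      simp only [loopA, List.foldl_cons]
      rw [nextHit_eq ht]
      exact ihf l' hl (s + (bestHitB t).1) (bestHitB t).2 (bestHitB_snd_ge ht)

-- ===== VERDICT (by name: the statement is the Claim_ definition above) =====
theorem find_nth_index_fast_spec : Claim_equal_find_nth_index_fast := by
  intro n _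
  unfold Spec_find_nth_index_fast find_nth_index_fast find_nth_index_fast_alt
  by_cases h1 : n = 1
  · subst h1
    norm_num [PySem.List.pyRange_one, pvT]
  · rw [if_neg h1]
    rw [loopA_eq_fold (n - 1).toNat (PySem.List.pyRange 0 (n - 1) 1)
      (by rw [PySem.List.length_pyRange_one]; omega) 0 2 le_rfl]
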